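-- pv_equiv track=rewrite | github.com/python15/homework | 3/sunyuanjun/zuoye.py | cn
-- ===== SOURCE A (Python) =====
-- def monetary_unit(nums,unit=0):
--     nums_dict = {0:'零',1:'壹',2:'贰',3:'叁',4:'肆',5:'伍',6:'陆',7:'柒',8:'捌',9:'玖'}
--     unit_dict = {0:'',1:'元',2:'拾',3:'佰',4:'仟'}
--     return nums_dict[nums]+unit_dict[unit]
--
-- def cn(number,count=1,result=''):
--     x,y = divmod(number,10)
--     if y == 0:
--         if count == 1:
--             result = '元'+result
--         else:
--             result = monetary_unit(y) + result
--     else: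
--         result = monetary_unit(y,count) + result
--
--     if '零零' in result:
--         result = result.replace('零零','零')
--
--     if '零元' in result:
--         result = result.replace('零元','元')
--
--     if x > 0:
--         return cn(x,count+1,result)
--
--     return result
-- ===== SOURCE B (Python) =====
-- def cn(number, count=1, result=''):
--     nums = ['零', '壹', '贰', '叁', '肆', '伍', '陆', '柒', '捌', '玖']
--     units = ['', '元', '拾', '佰', '仟']
--     while True:
--         number, y = divmod(number, 10)
--         piece = ('元' if count == 1 else '零') if y == 0 else nums[y] + units[count]
--         result = (piece + result).replace('零零', '零').replace('零元', '元')
--         if number <= 0: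
--             return result
--         count += 1
-- ===== Notes on version B (the rewrite author's own statement) =====
-- stated objective: simpler
-- what changed: Replaced A's recursion with its dict-building helper and membership-guarded replaces by a single iterative while-loop over divmod that looks the digit and unit strings up in two list tables and applies the two replaces unconditionally in a chain.
import Mathlib
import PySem

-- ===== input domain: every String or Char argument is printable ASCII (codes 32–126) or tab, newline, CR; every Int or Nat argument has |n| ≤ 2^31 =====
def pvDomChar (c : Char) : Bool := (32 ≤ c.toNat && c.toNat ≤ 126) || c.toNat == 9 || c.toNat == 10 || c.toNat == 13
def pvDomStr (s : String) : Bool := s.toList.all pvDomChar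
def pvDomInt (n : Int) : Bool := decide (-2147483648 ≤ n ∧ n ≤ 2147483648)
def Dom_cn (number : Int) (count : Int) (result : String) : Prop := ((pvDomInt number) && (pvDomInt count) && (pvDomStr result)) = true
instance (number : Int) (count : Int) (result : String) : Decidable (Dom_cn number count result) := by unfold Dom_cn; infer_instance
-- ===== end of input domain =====

-- B is the same conversion written as a single while-loop with table lists and unconditional
-- chained replaces instead of A's recursion with dict-built helper and guarded replaces (objective: simpler).

-- ===== PORT A =====
-- A-side helper: monetary_unit with its two dict literals (dict indexing d[k]; KeyError is outside Pre_)
def pvNumsDict : PySem.Dict Int String := PySem.Dict.ofList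
  [(0, "零"), (1, "壹"), (2, "贰"), (3, "叁"), (4, "肆"), (5, "伍"), (6, "陆"), (7, "柒"), (8, "捌"), (9, "玖")]
def pvUnitDict : PySem.Dict Int String := PySem.Dict.ofList
  [(0, ""), (1, "元"), (2, "拾"), (3, "佰"), (4, "仟")]
def monetary_unit (nums : Int) (unit : Int) : String :=
  ((PySem.Dict.get? pvNumsDict nums).getD "") ++ ((PySem.Dict.get? pvUnitDict unit).getD "")

lemma pv_floordiv_toNat_lt (number : Int) (h : 0 < PySem.Int.floordiv number 10) :
    (PySem.Int.floordiv number 10).toNat < number.toNat := by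
  have h2 := PySem.Int.floordiv_mul_add_mod number 10
  have h3 := PySem.Int.mod_nonneg number (by norm_num : (0:Int) < 10)
  have h4 := PySem.Int.mod_lt number (by norm_num : (0:Int) < 10)
  omega

def cn (number : Int) (count : Int) (result : String) : String :=
  let x := PySem.Int.floordiv number 10
  let y := PySem.Int.mod number 10
  let result1 :=
    if y = 0 then
      (if count = 1 then "元" ++ result else monetary_unit y 0 ++ result)
    else monetary_unit y count ++ result
  let result2 := if PySem.Str.isIn "零零" result1 then PySem.Str.replace result1 "零零" "零" else result1
  let result3 := if PySem.Str.isIn "零元" result2 then PySem.Str.replace result2 "零元" "元" else result2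
  if 0 < x then cn x (count + 1) result3 else result3
termination_by number.toNat
decreasing_by exact pv_floordiv_toNat_lt number (by assumption)

-- ===== PORT B =====
-- B-side tables (Python lists, indexed with pyGet?; IndexError is outside Pre_)
def pvAltNums : List String := ["零", "壹", "贰", "叁", "肆", "伍", "陆", "柒", "捌", "玖"]
def pvAltUnits : List String := ["", "元", "拾", "佰", "仟"]

def cn_alt (number : Int) (count : Int) (result : String) : String :=
  let x := PySem.Int.floordiv number 10
  let y := PySem.Int.mod number 10
  let piece :=
    if y = 0 then (if count = 1 then "元" else "零")
    else ((PySem.List.pyGet? pvAltNums y).getD "") ++ ((PySem.List.pyGet? pvAltUnits count).getD "")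
  let result' := PySem.Str.replace (PySem.Str.replace (piece ++ result) "零零" "零") "零元" "元"
  if x ≤ 0 then result' else cn_alt x (count + 1) result'
termination_by number.toNat
decreasing_by exact pv_floordiv_toNat_lt number (by omega)

-- ===== PRECONDITION & SPEC =====
-- Pre_cn excludes exactly the inputs on which A raises KeyError: some loop step i reaches a
-- nonzero digit while count + i is outside unit_dict's keys 0..4 (for |number| ≤ 2^31 at most 10 steps run).
def Pre_cn (number : Int) (count : Int) (result : String) : Prop :=
  ∀ i : Nat, i < 10 → (i = 0 ∨ (10:Int) ^ i ≤ number) →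
    PySem.Int.mod (PySem.Int.floordiv number ((10:Int) ^ i)) 10 ≠ 0 →
    0 ≤ count + i ∧ count + i ≤ 4
instance (number : Int) (count : Int) (result : String) : Decidable (Pre_cn number count result) := by
  unfold Pre_cn; infer_instance

def pvWitness_cn : Int × Int × String := (907, 1, "")

def Spec_cn (number : Int) (count : Int) (result : String) (out : String) : Prop := out = cn_alt number count result
instance (number : Int) (count : Int) (result : String) (out : String) : Decidable (Spec_cn number count result out) := by unfold Spec_cn; infer_instance

-- ===== CLAIM (what is proved, stated in full; the proofs are below) =====
def Claim_equal_cn : Prop := ∀ (number : Int) (count : Int) (result : String), Dom_cn number count result → Pre_cn number count result → Spec_cn number count result (cn number count result)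

-- ===== LEMMAS AND PROOFS =====

-- replace is the identity when the (nonempty) pattern does not occur
lemma pv_replace_go_noop (old new : List Char) (hold : old ≠ []) :
    ∀ (fuel : Nat) (l acc : List Char), ¬ old <:+: l →
      PySem.Chars.replace.go old new fuel l acc = acc.reverse ++ l := by
  intro fuel
  induction fuel with
  | zero => intro l acc _; simp [PySem.Chars.replace.go]
  | succ n ih =>
    intro l acc h
    cases l with
    | nil => simp [PySem.Chars.replace.go]
    | cons c t =>
      have hpre : old.isPrefixOf (c :: t) = false := by
        by_contra hx
        have : old <+: (c :: t) := List.isPrefixOf_iff_prefix.mp (by revert hx; cases old.isPrefixOf (c :: t) <;> simp)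
        exact h this.isInfix
      have ht : ¬ old <:+: t := fun hx => h (hx.trans (List.suffix_cons c t).isInfix)
      simp [PySem.Chars.replace.go, hpre, ih t (c :: acc) ht]

lemma pv_replace_noop (s pat rep : String) (hpat : pat.toList ≠ [])
    (h : PySem.Str.isIn pat s = false) : PySem.Str.replace s pat rep = s := by
  have hinf : ¬ pat.toList <:+: s.toList := by
    have := PySem.Str.isIn_iff_infix (sub := pat) (s := s)
    intro hx; rw [← this] at hx; rw [h] at hx; cases hx
  have : PySem.Chars.replace s.toList pat.toList rep.toList = s.toList := by
    unfold PySem.Chars.replace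
    have : pat.toList.isEmpty = false := by cases hp : pat.toList <;> simp_all
    rw [this]
    simpa using pv_replace_go_noop pat.toList rep.toList hpat s.toList.length s.toList [] hinf
  calc PySem.Str.replace s pat rep = String.ofList (PySem.Chars.replace s.toList pat.toList rep.toList) := rfl
    _ = String.ofList s.toList := by rw [this]
    _ = s := by simp

lemma pv_cond_replace (s pat rep : String) (hold : pat.toList ≠ []) :
    (if PySem.Str.isIn pat s then PySem.Str.replace s pat rep else s) = PySem.Str.replace s pat rep := by
  cases h : PySem.Str.isIn pat s with
  | true => simp
  | false => simp [pv_replace_noop s pat rep hold h]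

-- the two per-step prefixes coincide under the step's key bound
lemma pv_piece_eq (y count : Int) (h0 : 0 ≤ y) (h10 : y < 10) (hc : y ≠ 0 → 0 ≤ count ∧ count ≤ 4) :
    (if y = 0 then (if count = 1 then "元" else monetary_unit y 0) else monetary_unit y count)
    = (if y = 0 then (if count = 1 then "元" else "零")
       else ((PySem.List.pyGet? pvAltNums y).getD "") ++ ((PySem.List.pyGet? pvAltUnits count).getD "")) := by
  by_cases hy : y = 0
  · subst hy
    have hmu : monetary_unit 0 0 = "零" := by decide
    by_cases hc1 : count = 1 <;> simp [hc1, hmu]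
  · obtain ⟨hc1, hc2⟩ := hc hy
    simp only [if_neg hy]
    interval_cases y <;> interval_cases count <;> rfl

-- one loop/recursion step's string update, for each side
def pvStepA (number count : Int) (result : String) : String :=
  let y := PySem.Int.mod number 10
  let result1 :=
    if y = 0 then (if count = 1 then "元" ++ result else monetary_unit y 0 ++ result)
    else monetary_unit y count ++ result
  let result2 := if PySem.Str.isIn "零零" result1 then PySem.Str.replace result1 "零零" "零" else result1
  if PySem.Str.isIn "零元" result2 then PySem.Str.replace result2 "零元" "元" else result2

def pvStepB (number count : Int) (result : String) : String :=
  let y := PySem.Int.mod number 10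
  let piece :=
    if y = 0 then (if count = 1 then "元" else "零")
    else ((PySem.List.pyGet? pvAltNums y).getD "") ++ ((PySem.List.pyGet? pvAltUnits count).getD "")
  PySem.Str.replace (PySem.Str.replace (piece ++ result) "零零" "零") "零元" "元"

lemma pv_cn_step (number count : Int) (result : String) :
    cn number count result =
      (if 0 < PySem.Int.floordiv number 10 then
        cn (PySem.Int.floordiv number 10) (count + 1) (pvStepA number count result)
      else pvStepA number count result) := by
  rw [cn]; rfl

lemma pv_cn_alt_step (number count : Int) (result : String) :
    cn_alt number count result =
      (if PySem.Int.floordiv number 10 ≤ 0 then pvStepB number count result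
       else cn_alt (PySem.Int.floordiv number 10) (count + 1) (pvStepB number count result)) := by
  rw [cn_alt]; rfl

-- one body step of A equals one body step of B
lemma pv_body_eq (number count : Int) (result : String)
    (hc : PySem.Int.mod number 10 ≠ 0 → 0 ≤ count ∧ count ≤ 4) :
    pvStepA number count result = pvStepB number count result := by
  unfold pvStepA pvStepB
  have h0 : 0 ≤ PySem.Int.mod number 10 := PySem.Int.mod_nonneg number (by norm_num)
  have h10 : PySem.Int.mod number 10 < 10 := PySem.Int.mod_lt number (by norm_num)
  have hp := pv_piece_eq (PySem.Int.mod number 10) count h0 h10 hc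
  simp only []
  rw [pv_cond_replace _ _ _ (by decide), pv_cond_replace _ _ _ (by decide)]
  congr 2
  by_cases hy : PySem.Int.mod number 10 = 0 <;> by_cases hc1 : count = 1 <;> simp_all

-- the precondition carries to the next loop step
lemma pv_pre_step (number count : Int) (result result' : String) (hb : number < 10 ^ 10)
    (hx : 0 < PySem.Int.floordiv number 10) (hpre : Pre_cn number count result) :
    Pre_cn (PySem.Int.floordiv number 10) (count + 1) result' := by
  have hdm := PySem.Int.floordiv_mul_add_mod number 10
  have hm0 := PySem.Int.mod_nonneg number (by norm_num : (0:Int) < 10)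
  intro i hi hreach hdig
  have hxpow : (10:Int) ^ i ≤ PySem.Int.floordiv number 10 := by
    rcases hreach with h | h
    · subst h; simpa using hx
    · exact h
  have hi9 : i < 9 := by
    by_contra hge
    have hi9' : i = 9 := by omega
    subst hi9'
    have : (10:Int) ^ 10 ≤ number := by
      have : (10:Int) * 10 ^ 9 ≤ 10 * PySem.Int.floordiv number 10 := by
        exact mul_le_mul_of_nonneg_left hxpow (by norm_num)
      nlinarith [hm0]
    omega
  have hdd : PySem.Int.floordiv (PySem.Int.floordiv number 10) ((10:Int) ^ i)
      = PySem.Int.floordiv number ((10:Int) ^ (i + 1)) := by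
    rw [PySem.Int.floordiv_eq_ediv_of_pos (by norm_num : (0:Int) < 10),
        PySem.Int.floordiv_eq_ediv_of_pos (by positivity),
        PySem.Int.floordiv_eq_ediv_of_pos (by positivity)]
    rw [Int.ediv_ediv_of_nonneg (by norm_num)]
    ring_nf
  have := hpre (i + 1) (by omega)
    (Or.inr (by
      push_cast
      calc (10:Int) ^ (i + 1) = 10 * 10 ^ i := by ring
        _ ≤ 10 * PySem.Int.floordiv number 10 := by
            exact mul_le_mul_of_nonneg_left hxpow (by norm_num)
        _ ≤ number := by omega))
    (by rw [← hdd]; exact hdig)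
  push_cast at this ⊢
  omega

lemma pv_main : ∀ (n : Nat) (number count : Int) (result : String), number.toNat = n →
    number < 10 ^ 10 → Pre_cn number count result → cn number count result = cn_alt number count result := by
  intro n
  induction n using Nat.strong_induction_on with
  | _ n ih =>
    intro number count result hn hb hpre
    have hc0 : PySem.Int.mod number 10 ≠ 0 → 0 ≤ count ∧ count ≤ 4 := by
      intro hy
      have hf1 : PySem.Int.floordiv number ((10:Int) ^ (0:Nat)) = number := by
        rw [PySem.Int.floordiv_eq_ediv_of_pos (by norm_num)]; simp
      have := hpre 0 (by norm_num) (Or.inl rfl) (by rw [hf1]; exact hy)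
      simpa using this
    have hbody := pv_body_eq number count result hc0
    rw [pv_cn_step, pv_cn_alt_step, hbody]
    by_cases hx : 0 < PySem.Int.floordiv number 10
    · rw [if_pos hx, if_neg (by omega)]
      have hdm := PySem.Int.floordiv_mul_add_mod number 10
      have hm0 := PySem.Int.mod_nonneg number (by norm_num : (0:Int) < 10)
      exact ih (PySem.Int.floordiv number 10).toNat
        (by subst hn; exact pv_floordiv_toNat_lt number hx)
        _ _ _ rfl (by omega)
        (pv_pre_step number count result _ hb hx hpre)
    · rw [if_neg hx, if_pos (by omega)]

-- ===== VERDICT (by name: the statement is the Claim_ definition above) =====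
theorem cn_spec : Claim_equal_cn := by
  intro number count result hdom hpre
  unfold Spec_cn
  have hb : number < 10 ^ 10 := by
    have : pvDomInt number = true := by
      unfold Dom_cn at hdom; simp at hdom; tauto
    unfold pvDomInt at this; simp at this; omega
  exact pv_main number.toNat number count result rfl hb hpre
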